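-- pv_equiv track=rewrite | github.com/Hazeeeeeeeeeeee/scr.report | backend/category/categories_all_leaderboards.py | build_category_urls
-- ===== SOURCE A (Python) =====
-- from itertools import product
--
-- def build_category_urls(subcategories, game, category_id):
--     subcategory_values = [list(values.items()) for values in subcategories.values()]
--     urls_dict = {}
--     for combination in product(*subcategory_values):
--         query_string = "&".join([value_query for _, value_query in combination])
--         descriptive_path = "_".join([name for name, _ in combination])
--         url = f"{category_id}?{query_string}"
--         urls_dict[descriptive_path] = url
--     return urls_dict
-- ===== SOURCE B (Python) =====
-- def build_category_urls(subcategories, game, category_id):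
--     # mixed-radix enumeration: each combination index i in range(total) is decoded
--     # into one item per group by repeated divmod (last group varies fastest),
--     # which matches itertools.product's order
--     groups = [list(values.items()) for values in subcategories.values()]
--     total = 1
--     for g in groups:
--         total *= len(g)
--     urls_dict = {}
--     for i in range(total):
--         idx = i
--         names = []
--         queries = []
--         for g in reversed(groups):
--             idx, r = divmod(idx, len(g))
--             name, query = g[r]
--             names.append(name)
--             queries.append(query)
--         names.reverse()
--         queries.reverse()
--         urls_dict["_".join(names)] = f"{category_id}?" + "&".join(queries)
--     return urls_dict
-- ===== Notes on version B (the rewrite author's own statement) =====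
-- stated objective: alternative
-- what changed: Replaces itertools.product enumeration over pre-unzipped item lists with mixed-radix index decoding: a single counter over range(total) whose digits (extracted by repeated divmod from the last group backwards) select one item per group.
import Mathlib
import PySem

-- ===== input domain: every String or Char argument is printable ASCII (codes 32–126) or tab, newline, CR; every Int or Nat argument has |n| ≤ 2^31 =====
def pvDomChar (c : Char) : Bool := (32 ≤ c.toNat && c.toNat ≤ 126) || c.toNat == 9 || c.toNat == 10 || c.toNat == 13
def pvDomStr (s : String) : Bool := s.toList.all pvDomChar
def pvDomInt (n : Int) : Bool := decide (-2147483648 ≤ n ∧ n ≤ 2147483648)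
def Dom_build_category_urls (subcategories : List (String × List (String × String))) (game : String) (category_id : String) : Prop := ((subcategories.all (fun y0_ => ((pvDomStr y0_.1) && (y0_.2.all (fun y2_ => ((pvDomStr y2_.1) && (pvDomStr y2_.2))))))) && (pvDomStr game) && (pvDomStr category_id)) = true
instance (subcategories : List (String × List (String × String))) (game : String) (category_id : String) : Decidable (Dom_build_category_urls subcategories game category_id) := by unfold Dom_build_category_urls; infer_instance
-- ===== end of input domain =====

-- B replaces itertools.product enumeration by mixed-radix index decoding (a single counter
-- whose digits, extracted by repeated divmod, pick one item per group); same cost (objective: alternative).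

-- ===== PORT A =====
-- itertools.product(*lists): first list varies slowest, last varies fastest
def pvProduct : List (List (String × String)) → List (List (String × String))
  | [] => [[]]
  | g :: gs => g.flatMap (fun x => (pvProduct gs).map (fun c => x :: c))

def build_category_urls (subcategories : List (String × List (String × String))) (game : String) (category_id : String) : List (String × String) :=
  let subcategory_values := subcategories.map (fun kv => kv.2)
  let urls_dict : PySem.Dict String String :=
    (pvProduct subcategory_values).foldl
      (fun d combination =>
        let query_string := PySem.Str.join "&" (combination.map (fun p => p.2))
        let descriptive_path := PySem.Str.join "_" (combination.map (fun p => p.1))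
        let url := category_id ++ "?" ++ query_string
        d.insert descriptive_path url)
      PySem.Dict.empty
  urls_dict.items

-- ===== PORT B =====
-- mixed-radix decoding of a combination index i: divmod from the last group backwards.
-- The divisor len(g) and the index r are only reached when total > 0, i.e. every group is
-- non-empty and r = i % len(g) is in range, so the pyGetD default is never used.
def build_category_urls_alt (subcategories : List (String × List (String × String))) (game : String) (category_id : String) : List (String × String) :=
  let groups := subcategories.map (fun kv => kv.2)
  let total : Int := groups.foldl (fun t g => t * (g.length : Int)) 1
  let urls_dict : PySem.Dict String String :=
    (PySem.List.pyRange 0 total 1).foldl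
      (fun d i =>
        let st :=
          groups.reverse.foldl
            (fun (s : Int × List String × List String) g =>
              let dm := (PySem.Int.floordiv s.1 (g.length : Int), PySem.Int.mod s.1 (g.length : Int))
              let nq := PySem.List.pyGetD g dm.2 ("", "")
              (dm.1, s.2.1 ++ [nq.1], s.2.2 ++ [nq.2]))
            (i, ([] : List String), ([] : List String))
        let names := st.2.1.reverse
        let queries := st.2.2.reverse
        d.insert (PySem.Str.join "_" names) (category_id ++ "?" ++ PySem.Str.join "&" queries))
      PySem.Dict.empty
  urls_dict.items

-- ===== PRECONDITION & SPEC =====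
def Spec_build_category_urls (subcategories : List (String × List (String × String))) (game : String) (category_id : String) (out : List (String × String)) : Prop := out = build_category_urls_alt subcategories game category_id
instance (subcategories : List (String × List (String × String))) (game : String) (category_id : String) (out : List (String × String)) : Decidable (Spec_build_category_urls subcategories game category_id out) := by unfold Spec_build_category_urls; infer_instance

-- ===== CLAIM (what is proved, stated in full; the proofs are below) =====
def Claim_equal_build_category_urls : Prop := ∀ (subcategories : List (String × List (String × String))) (game : String) (category_id : String), Dom_build_category_urls subcategories game category_id → Spec_build_category_urls subcategories game category_id (build_category_urls subcategories game category_id)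

-- ===== LEMMAS AND PROOFS =====

-- the number of combinations
def pvTotal (gs : List (List (String × String))) : Nat := (gs.map List.length).prod

-- the decoding step of B's inner loop (identical to the lambda in the port)
def pvStep (s : Int × List String × List String) (g : List (String × String)) :
    Int × List String × List String :=
  let dm := (PySem.Int.floordiv s.1 (g.length : Int), PySem.Int.mod s.1 (g.length : Int))
  let nq := PySem.List.pyGetD g dm.2 ("", "")
  (dm.1, s.2.1 ++ [nq.1], s.2.2 ++ [nq.2])

-- one full decode of a combination index
def pvDecode (gs : List (List (String × String))) (k : Int) : List String × List String :=
  let st := gs.reverse.foldl pvStep (k, [], [])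
  (st.2.1.reverse, st.2.2.reverse)

-- the shared dict-insertion step of both outer loops
def pvIns (cid : String) (d : PySem.Dict String String) (p : List String × List String) : PySem.Dict String String :=
  d.insert (PySem.Str.join "_" p.1) (cid ++ "?" ++ PySem.Str.join "&" p.2)

theorem pvMapRangeGetD {α β : Type} (l : List α) (h : α → β) (d : α) :
    (List.range l.length).map (fun r => h (l.getD r d)) = l.map h := by
  induction l with
  | nil => simp
  | cons a t ih =>
    rw [List.length_cons, List.range_succ_eq_map]
    simp only [List.map_cons, List.getD_cons_zero, List.map_map]
    simp only [List.getD_eq_getElem?_getD] at ih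
    simp [Function.comp_def, ih]

theorem pvTotalInt (gs : List (List (String × String))) (c : Int) :
    gs.foldl (fun t g => t * (g.length : Int)) c = c * (pvTotal gs : Int) := by
  induction gs generalizing c with
  | nil => simp [pvTotal]
  | cons g gs ih => rw [List.foldl_cons, ih]; simp [pvTotal]; ring

theorem pvProduct_snoc (gs : List (List (String × String))) (g : List (String × String)) :
    pvProduct (gs ++ [g]) = (pvProduct gs).flatMap (fun c => g.map (fun x => c ++ [x])) := by
  induction gs with
  | nil =>
    simp only [List.nil_append, pvProduct, List.flatMap_cons, List.flatMap_nil, List.append_nil,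
      List.map_cons, List.map_nil]
    exact (List.map_eq_flatMap).symm
  | cons h t ih =>
    simp only [List.cons_append, pvProduct, ih, List.flatMap_assoc, List.flatMap_map]
    congr 1; funext x
    rw [List.map_flatMap]
    congr 1; funext c
    simp

theorem pvRangeSplit {β : Type} (T m : Nat) (F : Nat → β) :
    (List.range (T * m)).map F
      = (List.range T).flatMap (fun j => (List.range m).map (fun r => F (j * m + r))) := by
  induction T with
  | zero => simp
  | succ T ih =>
    rw [Nat.succ_mul, List.range_add, List.range_succ]
    simp [List.map_map, ih, Function.comp]

theorem pvAccShift (rev : List (List (String × String))) (s : Int) (ns qs : List String) :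
    rev.foldl pvStep (s, ns, qs)
      = ((rev.foldl pvStep (s, [], [])).1,
         ns ++ (rev.foldl pvStep (s, [], [])).2.1,
         qs ++ (rev.foldl pvStep (s, [], [])).2.2) := by
  induction rev generalizing s ns qs with
  | nil => simp
  | cons g t ih =>
    simp only [List.foldl_cons]
    rw [ih, ih (pvStep (s, [], []) g).1]
    simp [pvStep]

theorem pvKey (gs : List (List (String × String))) :
    (List.range (pvTotal gs)).map (fun k : Nat => pvDecode gs (k : Int))
      = (pvProduct gs).map (fun c => (c.map Prod.fst, c.map Prod.snd)) := by
  induction gs using List.reverseRecOn with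
  | nil => simp [pvTotal, pvProduct, pvDecode]
  | append_singleton gs g ih =>
    have hT : pvTotal (gs ++ [g]) = pvTotal gs * g.length := by simp [pvTotal]
    rcases Nat.eq_zero_or_pos g.length with hm | hm
    · have hg : g = [] := List.eq_nil_of_length_eq_zero hm
      subst hg
      simp [hT, pvProduct_snoc]
    · rw [hT, pvRangeSplit, pvProduct_snoc, List.map_flatMap]
      have hinner : ∀ j ∈ List.range (pvTotal gs),
          (List.range g.length).map (fun r => pvDecode (gs ++ [g]) ((j * g.length + r : Nat) : Int))
            = g.map (fun x => ((pvDecode gs j).1 ++ [x.1], (pvDecode gs j).2 ++ [x.2])) := by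
        intro j hj
        rw [← pvMapRangeGetD g (fun x => ((pvDecode gs j).1 ++ [x.1], (pvDecode gs j).2 ++ [x.2])) ("", "")]
        apply List.map_congr_left
        intro r hr
        rw [List.mem_range] at hr
        unfold pvDecode
        rw [List.reverse_append]
        simp only [List.reverse_cons, List.reverse_nil, List.nil_append, List.singleton_append,
          List.foldl_cons]
        have h1 : (j * g.length + r) / g.length = j := by
          rw [Nat.mul_comm, Nat.mul_add_div hm, Nat.div_eq_of_lt hr]
          omega
        have h2 : (j * g.length + r) % g.length = r := by
          rw [Nat.mul_comm, Nat.mul_add_mod, Nat.mod_eq_of_lt hr]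
        have hstep : pvStep (((j * g.length + r : Nat) : Int), [], []) g
            = ((j : Int), [(g.getD r ("", "")).1], [(g.getD r ("", "")).2]) := by
          unfold pvStep
          simp only [PySem.Int.floordiv_natCast, PySem.Int.mod_natCast, PySem.List.pyGetD_natCast,
            h1, h2, List.nil_append]
        rw [hstep, pvAccShift]
        simp
      calc (List.range (pvTotal gs)).flatMap
              (fun j => (List.range g.length).map
                (fun r => (fun k : Nat => pvDecode (gs ++ [g]) (k : Int)) (j * g.length + r)))
            = (List.range (pvTotal gs)).flatMap
              (fun j : Nat => g.map (fun x => ((pvDecode gs (j : Int)).1 ++ [x.1], (pvDecode gs (j : Int)).2 ++ [x.2]))) :=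
          List.flatMap_congr hinner
        _ = ((List.range (pvTotal gs)).map (fun j : Nat => pvDecode gs (j : Int))).flatMap
              (fun p => g.map (fun x => (p.1 ++ [x.1], p.2 ++ [x.2]))) :=
          (List.flatMap_map (fun j : Nat => pvDecode gs (j : Int))
            (fun p => g.map (fun x => (p.1 ++ [x.1], p.2 ++ [x.2])))
            (List.range (pvTotal gs))).symm
        _ = ((pvProduct gs).map (fun c => (c.map Prod.fst, c.map Prod.snd))).flatMap
              (fun p => g.map (fun x => (p.1 ++ [x.1], p.2 ++ [x.2]))) := by rw [ih]
        _ = (pvProduct gs).flatMap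
              (fun c => g.map (fun x => ((c.map Prod.fst) ++ [x.1], (c.map Prod.snd) ++ [x.2]))) :=
          List.flatMap_map _ _ _
        _ = (pvProduct gs).flatMap
              (fun c => (g.map (fun x => c ++ [x])).map
                (fun c => (c.map Prod.fst, c.map Prod.snd))) := by
          apply List.flatMap_congr
          intro c _
          simp

-- ===== VERDICT (by name: the statement is the Claim_ definition above) =====
theorem build_category_urls_spec : Claim_equal_build_category_urls := by
  intro subs game cid _
  unfold Spec_build_category_urls
  have hA : build_category_urls subs game cid
      = ((pvProduct (subs.map (fun kv => kv.2))).foldl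
          (fun d c => pvIns cid d (c.map Prod.fst, c.map Prod.snd)) PySem.Dict.empty).items := rfl
  have hB : build_category_urls_alt subs game cid
      = ((PySem.List.pyRange 0
            ((subs.map (fun kv => kv.2)).foldl (fun t g => t * (g.length : Int)) 1) 1).foldl
          (fun d i => pvIns cid d (pvDecode (subs.map (fun kv => kv.2)) i)) PySem.Dict.empty).items := rfl
  rw [hA, hB, pvTotalInt, one_mul, PySem.List.pyRange_zero_nat]
  rw [List.foldl_map]
  rw [← List.foldl_map (f := fun c : List (String × String) => (c.map Prod.fst, c.map Prod.snd)) (g := pvIns cid)]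
  rw [← List.foldl_map (f := fun k : Nat => pvDecode (subs.map (fun kv => kv.2)) (k : Int)) (g := pvIns cid)]
  rw [pvKey]
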